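-- pv_equiv track=rewrite | github.com/AshwinDeshpande96/Measuring_the_Impact_of_Verbal_Disfluency_Tags_on_Automated_Dementia_Detection | code/disfluency/remove_disfluency_fisher.py | remove_retracing
-- ===== SOURCE A (Python) =====
-- def update(new, old):
--     t = None
--     if new is not None:
--         t = new
--     if old is not None:
--         t = old
--     return t
--
-- def remove_retracing(pred, alignment, all_errors):
--     if all_errors is None or not all_errors:
--         if pred is not None:
--             pred = pred.split()
--             transcript = " ".join([w for w in pred[::2]])
--             transcript = ""
--             return transcript
--         else:
--             return None
--     if pred is None or not pred:
--         return None
--     pred = pred.split()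
--     pred_tags = pred[1::2]
--     pred_words = pred[::2]
--     detected_wret_errors = {}
--     detected_wret_idx = {}
--     detected_pret_errors = {}
--     detected_pret_idx = {}
--     _, _, target_wrets, target_prets = all_errors
--     for (idx, (word, orig_idx), tag) in zip(list(range(len(alignment))), alignment, pred_tags):
--         if tag != "E":
--             continue
--         for wrep in target_wrets:
--             if orig_idx in wrep:
--                 key = "_".join([str(wi) for wi in wrep])
--                 val = [True if wi == orig_idx else False for wi in wrep]
--                 val2 = [idx if wi == orig_idx else None for wi in wrep]
--                 if key not in detected_wret_errors:
--                     detected_wret_errors[key] = val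
--                     detected_wret_idx[key] = val2
--                 else:
--                     value = detected_wret_errors[key]
--                     value2 = detected_wret_idx[key]
--                     value = [new or old for new, old in zip(val, value)]
--                     value2 = [update(new, old) for new, old in zip(val2, value2)]
--                     detected_wret_errors[key] = value
--                     detected_wret_idx[key] = value2
--         for prep in target_prets:
--             if orig_idx in prep:
--                 key = "_".join([str(wi) for wi in prep])
--                 val = [True if wi == orig_idx else False for wi in prep]
--                 val2 = [idx if wi == orig_idx else None for wi in prep]
--                 if key not in detected_pret_errors:
--                     detected_pret_errors[key] = val
--                     detected_pret_idx[key] = val2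
--                 else:
--                     value = detected_pret_errors[key]
--                     value2 = detected_pret_idx[key]
--                     value = [new or old for new, old in zip(val, value)]
--                     value2 = [update(new, old) for new, old in zip(val2, value2)]
--                     detected_pret_errors[key] = value
--                     detected_pret_idx[key] = value2
--     success_wrep = []
--     success_prep = []
--     for key, value in detected_wret_errors.items():
--         if sum(value) == len(value):
--             success_wrep.append(key)
--     for key, value in detected_pret_errors.items():
--         if sum(value) == len(value):
--             success_prep.append(key)
--     for key in success_wrep:
--         words_to_remove = detected_wret_idx[key]
--         for wi in words_to_remove:
--             pred_words[wi] = "[TO BE REMOVED]"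
--     for key in success_prep:
--         words_to_remove = detected_pret_idx[key]
--         for wi in words_to_remove:
--             pred_words[wi] = "[TO BE REMOVED]"
--     transcript = " ".join([w for w in pred_words if w != '[TO BE REMOVED]'])
--     return transcript
-- ===== SOURCE B (Python) =====
-- def remove_retracing(pred, alignment, all_errors):
--     if all_errors is None or not all_errors:
--         return None if pred is None else ""
--     if pred is None or not pred:
--         return None
--     words = pred.split()
--     pred_words = words[::2]
--     pred_tags = words[1::2]
--     _, _, target_wrets, target_prets = all_errors
--     # one pass: first E-tagged prediction index for each original word index
--     first = {}
--     for idx, ((_w, orig_idx), tag) in enumerate(zip(alignment, pred_tags)):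
--         if tag == "E" and orig_idx not in first:
--             first[orig_idx] = idx
--     # a group is fully detected iff every member has an E-tagged match
--     remove = set()
--     for group in target_wrets + target_prets:
--         if all(w in first for w in group):
--             remove.update(first[w] for w in group)
--     return " ".join(w for i, w in enumerate(pred_words) if i not in remove)
-- ===== Notes on version B (the rewrite author's own statement) =====
-- stated objective: alternative
-- what changed: B replaces A's per-error scan over every group with keyed boolean/index merge dictionaries by a single pass that records the first E-tagged prediction index per original word index in one hash map, then decides each group and collects the removal set directly.
import Mathlib
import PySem

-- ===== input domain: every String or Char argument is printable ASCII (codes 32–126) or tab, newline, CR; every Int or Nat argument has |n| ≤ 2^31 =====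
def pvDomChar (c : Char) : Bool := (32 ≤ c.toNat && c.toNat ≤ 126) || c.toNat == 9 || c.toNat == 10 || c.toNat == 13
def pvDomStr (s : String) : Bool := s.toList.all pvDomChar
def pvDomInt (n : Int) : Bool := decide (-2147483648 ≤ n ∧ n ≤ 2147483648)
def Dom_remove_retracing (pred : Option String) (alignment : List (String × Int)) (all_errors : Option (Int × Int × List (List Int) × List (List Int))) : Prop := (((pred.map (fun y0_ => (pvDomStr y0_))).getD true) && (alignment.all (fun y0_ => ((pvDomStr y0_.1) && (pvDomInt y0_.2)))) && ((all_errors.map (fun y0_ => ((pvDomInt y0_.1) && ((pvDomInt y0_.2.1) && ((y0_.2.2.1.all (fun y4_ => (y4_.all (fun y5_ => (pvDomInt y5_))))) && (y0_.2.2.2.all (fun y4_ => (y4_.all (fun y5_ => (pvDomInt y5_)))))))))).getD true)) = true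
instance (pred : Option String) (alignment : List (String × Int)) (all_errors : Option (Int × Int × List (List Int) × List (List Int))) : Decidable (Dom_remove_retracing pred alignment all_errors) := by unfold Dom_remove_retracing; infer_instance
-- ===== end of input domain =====

-- B replaces A's per-event scan over all groups (merging keyed boolean/index lists in dicts)
-- by one hash map of each original index's first E-tagged prediction index, built in a single
-- pass, from which each group's removal indices are read off directly (objective: alternative).

-- ===== PORT A =====
-- helper `update` from the Python module
def pvUpdate (new old : Option Int) : Option Int :=
  let t : Option Int := none
  let t := if new ≠ none then new else t
  let t := if old ≠ none then old else t
  t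

-- "_".join([str(wi) for wi in grp])
def pvKey (grp : List Int) : String :=
  PySem.Str.join "_" (grp.map (fun wi => PySem.Int.toStr wi))

-- body of `for wrep in target_wrets: …` (resp. prets) for one group, one (idx, orig_idx) event
def pvGroupStep (idx orig : Int)
    (st : PySem.Dict String (List Bool) × PySem.Dict String (List (Option Int)))
    (grp : List Int) :
    PySem.Dict String (List Bool) × PySem.Dict String (List (Option Int)) :=
  if orig ∈ grp then
    let key := pvKey grp
    let val := grp.map (fun wi => wi == orig)
    let val2 := grp.map (fun wi => if wi == orig then some idx else none)
    match st.1.get? key with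
    | none => (st.1.insert key val, st.2.insert key val2)
    | some value =>
      -- detected_*_errors and detected_*_idx always carry the same keys, so the
      -- Python lookup detected_*_idx[key] never raises; getD [] is that lookup
      let value2 := (st.2.get? key).getD []
      let value' := (val.zip value).map (fun p => p.1 || p.2)
      let value2' := (val2.zip value2).map (fun p => pvUpdate p.1 p.2)
      (st.1.insert key value', st.2.insert key value2')
  else st

-- success_wrep / success_prep accumulation loop
def pvSuccess (d : PySem.Dict String (List Bool)) : List String :=
  d.items.foldl
    (fun acc kv =>
      if ((kv.2.map (fun b => if b then (1 : Int) else 0)).sum = (kv.2.length : Int)) then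
        acc ++ [kv.1]
      else acc) []

-- the two marking loops: pred_words[wi] = "[TO BE REMOVED]"
def pvMark (di : PySem.Dict String (List (Option Int))) (keys : List String)
    (pw : List String) : List String :=
  keys.foldl
    (fun pw key =>
      (di.getD key []).foldl
        (fun pw wi =>
          match wi with
          | some i => PySem.List.pySetD pw i "[TO BE REMOVED]"
          -- Python would raise TypeError on a None index; a successful key's
          -- index list never contains None, so this branch is unreachable
          | none => pw) pw) pw

-- the main loop over zip(range(len(alignment)), alignment, pred_tags)
def pvLoopA (alignment : List (String × Int)) (pred_tags : List String)
    (target_wrets target_prets : List (List Int)) :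
    (PySem.Dict String (List Bool) × PySem.Dict String (List (Option Int))) ×
    (PySem.Dict String (List Bool) × PySem.Dict String (List (Option Int))) :=
  (List.zip (List.zip (PySem.List.pyRange 0 (alignment.length : Int) 1) alignment) pred_tags).foldl
    (fun st ev =>
      if ev.2 ≠ "E" then st
      else
        (target_wrets.foldl (pvGroupStep ev.1.1 ev.1.2.2) st.1,
         target_prets.foldl (pvGroupStep ev.1.1 ev.1.2.2) st.2))
    ((PySem.Dict.empty, PySem.Dict.empty), (PySem.Dict.empty, PySem.Dict.empty))

-- the whole main branch of remove_retracing (pred truthy, all_errors truthy)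
def pvMainA (p : String) (alignment : List (String × Int))
    (target_wrets target_prets : List (List Int)) : String :=
  let predL := PySem.Str.split₀ p
  let pred_tags := (PySem.List.slice? predL (some 1) none 2).getD []
  let pred_words := (PySem.List.slice? predL none none 2).getD []
  let st := pvLoopA alignment pred_tags target_wrets target_prets
  let success_wrep := pvSuccess st.1.1
  let success_prep := pvSuccess st.2.1
  let pred_words := pvMark st.1.2 success_wrep pred_words
  let pred_words := pvMark st.2.2 success_prep pred_words
  PySem.Str.join " " (pred_words.filter (fun w => w ≠ "[TO BE REMOVED]"))

def remove_retracing (pred : Option String) (alignment : List (String × Int)) (all_errors : Option (Int × Int × List (List Int) × List (List Int))) : Option String :=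
  match all_errors with
  | none =>
    match pred with
    | some p =>
      let predL := PySem.Str.split₀ p
      let transcript := PySem.Str.join " " (((PySem.List.slice? predL none none 2).getD []).map (fun w => w))
      let _ := transcript
      let transcript := ""
      some transcript
    | none => none
  | some ae =>
    match pred with
    | none => none
    | some p =>
      if p = "" then none
      else some (pvMainA p alignment ae.2.2.1 ae.2.2.2)

-- ===== PORT B =====
-- one pass: first E-tagged prediction index per original word index
def pvFirstB (alignment : List (String × Int)) (pred_tags : List String) : PySem.Dict Int Int :=
  (PySem.List.enumerate (List.zip alignment pred_tags)).foldl
    (fun d q =>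
      if q.2.2 = "E" ∧ ¬ d.contains q.2.1.2 then d.insert q.2.1.2 q.1 else d)
    (PySem.Dict.empty : PySem.Dict Int Int)

-- the prediction indices to drop: groups whose members all matched
def pvRemoveB (first : PySem.Dict Int Int) (groups : List (List Int)) : PySem.Set Int :=
  groups.foldl
    (fun s g =>
      if g.all (fun w => first.contains w) then
        g.foldl
          (fun s w =>
            match first.get? w with
            | some i => PySem.Set.add s i
            -- Python first[w] cannot raise: the guard checked every w
            | none => s) s
      else s)
    (PySem.Set.ofList ([] : List Int))

-- the whole main branch of B
def pvMainB (p : String) (alignment : List (String × Int))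
    (target_wrets target_prets : List (List Int)) : String :=
  let words := PySem.Str.split₀ p
  let pred_words := (PySem.List.slice? words none none 2).getD []
  let pred_tags := (PySem.List.slice? words (some 1) none 2).getD []
  let first := pvFirstB alignment pred_tags
  let remove := pvRemoveB first (target_wrets ++ target_prets)
  PySem.Str.join " "
    (((PySem.List.enumerate pred_words).filter (fun q => ¬ q.1 ∈ remove)).map (fun q => q.2))

def remove_retracing_alt (pred : Option String) (alignment : List (String × Int)) (all_errors : Option (Int × Int × List (List Int) × List (List Int))) : Option String :=
  match all_errors with
  | none =>
    match pred with
    | some _ => some ""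
    | none => none
  | some ae =>
    match pred with
    | none => none
    | some p =>
      if p = "" then none
      else some (pvMainB p alignment ae.2.2.1 ae.2.2.2)

-- ===== PRECONDITION & SPEC =====
def Spec_remove_retracing (pred : Option String) (alignment : List (String × Int)) (all_errors : Option (Int × Int × List (List Int) × List (List Int))) (out : Option String) : Prop := out = remove_retracing_alt pred alignment all_errors
instance (pred : Option String) (alignment : List (String × Int)) (all_errors : Option (Int × Int × List (List Int) × List (List Int))) (out : Option String) : Decidable (Spec_remove_retracing pred alignment all_errors out) := by unfold Spec_remove_retracing; infer_instance

-- ===== CLAIM (what is proved, stated in full; the proofs are below) =====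
def Claim_equal_remove_retracing : Prop := ∀ (pred : Option String) (alignment : List (String × Int)) (all_errors : Option (Int × Int × List (List Int) × List (List Int))), Dom_remove_retracing pred alignment all_errors → Spec_remove_retracing pred alignment all_errors (remove_retracing pred alignment all_errors)

-- ===== LEMMAS AND PROOFS =====
theorem pvDigitCharDigit (k : Nat) (hk : k < 10) : (Nat.digitChar k).isDigit = true := by
  interval_cases k <;> decide

theorem pvToDigitsNeNil (n : Nat) : Nat.toDigits 10 n ≠ [] := by
  rw [Nat.toDigits_eq_if (by norm_num)]
  split <;> simp

theorem pvToDigitsDigit (n : Nat) : ∀ c ∈ Nat.toDigits 10 n, c.isDigit = true := by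
  induction n using Nat.strong_induction_on with
  | _ n ih =>
    rw [Nat.toDigits_eq_if (by norm_num)]
    split
    · next h => intro c hc; simp at hc; subst hc; exact pvDigitCharDigit n h
    · next h =>
      intro c hc
      rcases List.mem_append.mp hc with h1 | h1
      · exact ih (n / 10) (Nat.div_lt_self (by omega) (by norm_num)) c h1
      · simp at h1; subst h1; exact pvDigitCharDigit _ (Nat.mod_lt _ (by norm_num))

theorem pvDigitCharInj (a b : Nat) (ha : a < 10) (hb : b < 10)
    (h : Nat.digitChar a = Nat.digitChar b) : a = b := by
  interval_cases a <;> interval_cases b <;> first | rfl | (exfalso; exact absurd h (by decide))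

theorem pvToDigitsInj : ∀ a b : Nat, Nat.toDigits 10 a = Nat.toDigits 10 b → a = b := by
  intro a
  induction a using Nat.strong_induction_on with
  | _ a ih =>
    intro b h
    rw [Nat.toDigits_eq_if (by norm_num)] at h
    rw [Nat.toDigits_eq_if (b := 10) (n := b) (by norm_num)] at h
    by_cases ha : a < 10 <;> by_cases hb : b < 10
    · simp [ha, hb] at h; exact pvDigitCharInj a b ha hb h
    · simp only [if_pos ha, if_neg hb] at h
      have hl := congrArg List.length h
      simp only [List.length_singleton, List.length_append] at hl
      exact absurd (List.eq_nil_of_length_eq_zero (by omega)) (pvToDigitsNeNil (b / 10))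
    · simp only [if_neg ha, if_pos hb] at h
      have hl := congrArg List.length h
      simp only [List.length_singleton, List.length_append] at hl
      exact absurd (List.eq_nil_of_length_eq_zero (by omega)) (pvToDigitsNeNil (a / 10))
    · simp only [if_neg ha, if_neg hb] at h
      have h2 := List.append_inj h (by
        have := congrArg List.length h; simpa using this)
      obtain ⟨h2, h3⟩ := h2
      have hd := ih (a / 10) (Nat.div_lt_self (by omega) (by norm_num)) (b / 10) h2
      have hm : a % 10 = b % 10 := by
        have : Nat.digitChar (a % 10) = Nat.digitChar (b % 10) := by
          simpa using h3
        exact pvDigitCharInj _ _ (Nat.mod_lt _ (by norm_num)) (Nat.mod_lt _ (by norm_num)) this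
      omega

theorem pvToCharsNeNil (n : Int) : PySem.Int.toChars n ≠ [] := by
  unfold PySem.Int.toChars
  split <;> simp [pvToDigitsNeNil]

theorem pvToCharsNoUnderscore (n : Int) : '_' ∉ PySem.Int.toChars n := by
  unfold PySem.Int.toChars
  intro hmem
  split at hmem
  · rcases List.mem_cons.mp hmem with h | h
    · exact absurd h (by decide)
    · exact absurd (pvToDigitsDigit _ _ h) (by decide)
  · exact absurd (pvToDigitsDigit _ _ hmem) (by decide)

theorem pvToCharsInj (a b : Int) (h : PySem.Int.toChars a = PySem.Int.toChars b) : a = b := by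
  unfold PySem.Int.toChars at h
  by_cases ha : a < 0 <;> by_cases hb : b < 0 <;> simp only [ha, hb, if_true, if_false] at h
  · simp at h
    have := pvToDigitsInj _ _ h
    omega
  · have : '-' ∈ Nat.toDigits 10 b.toNat := by rw [← h]; exact List.mem_cons_self ..
    exact absurd (pvToDigitsDigit _ _ this) (by decide)
  · have : '-' ∈ Nat.toDigits 10 a.toNat := by rw [h]; exact List.mem_cons_self ..
    exact absurd (pvToDigitsDigit _ _ this) (by decide)
  · have := pvToDigitsInj _ _ h
    omega

-- splitting a word list at the first '_'
theorem pvUnderscoreSplit : ∀ (a a' r r' : List Char), '_' ∉ a → '_' ∉ a' →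
    a ++ '_' :: r = a' ++ '_' :: r' → a = a' ∧ r = r' := by
  intro a
  induction a with
  | nil =>
    intro a' r r' _ ha' h
    cases a' with
    | nil => simpa using h
    | cons c cs =>
      simp at h
      exact absurd (h.1 ▸ List.mem_cons_self ..) ha'
  | cons c cs ih =>
    intro a' r r' ha ha' h
    cases a' with
    | nil =>
      simp at h
      exact absurd (h.1 ▸ List.mem_cons_self ..) ha
    | cons c' cs' =>
      simp only [List.cons_append, List.cons.injEq] at h
      obtain ⟨rfl, h2⟩ := h
      have := ih cs' r r' (fun hm => ha (List.mem_cons_of_mem _ hm))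
        (fun hm => ha' (List.mem_cons_of_mem _ hm)) h2
      exact ⟨by rw [this.1], this.2⟩

theorem pvJoinNeNil (x : List Char) (t : List (List Char)) (hx : x ≠ []) :
    PySem.Chars.join ['_'] (x :: t) ≠ [] := by
  cases t with
  | nil => simpa [PySem.Chars.join, List.intercalate]
  | cons b t => simp [PySem.Chars.join, List.intercalate, List.intersperse, hx]

theorem pvJoinInj : ∀ (xs ys : List (List Char)),
    (∀ l ∈ xs, l ≠ [] ∧ '_' ∉ l) → (∀ l ∈ ys, l ≠ [] ∧ '_' ∉ l) →
    PySem.Chars.join ['_'] xs = PySem.Chars.join ['_'] ys → xs = ys := by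
  intro xs
  induction xs with
  | nil =>
    intro ys _ hy h
    cases ys with
    | nil => rfl
    | cons y t =>
      exact absurd h.symm (pvJoinNeNil y t (hy y (List.mem_cons_self ..)).1)
  | cons x xs ih =>
    intro ys hx hy h
    cases ys with
    | nil => exact absurd h (pvJoinNeNil x xs (hx x (List.mem_cons_self ..)).1)
    | cons y ys =>
      cases xs with
      | nil =>
        cases ys with
        | nil => simpa [PySem.Chars.join, List.intercalate] using h
        | cons b t =>
          rw [show PySem.Chars.join ['_'] [x] = x by simp [PySem.Chars.join, List.intercalate],
            show PySem.Chars.join ['_'] (y :: b :: t) = y ++ '_' :: PySem.Chars.join ['_'] (b :: t) by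
              simp [PySem.Chars.join, List.intercalate, List.intersperse]] at h
          exact absurd (h ▸ List.mem_append.mpr (Or.inr (List.mem_cons_self ..)))
            (hx x (List.mem_cons_self ..)).2
      | cons a t =>
        cases ys with
        | nil =>
          rw [show PySem.Chars.join ['_'] [y] = y by simp [PySem.Chars.join, List.intercalate],
            show PySem.Chars.join ['_'] (x :: a :: t) = x ++ '_' :: PySem.Chars.join ['_'] (a :: t) by
              simp [PySem.Chars.join, List.intercalate, List.intersperse]] at h
          exact absurd (h ▸ List.mem_append.mpr (Or.inr (List.mem_cons_self ..)))
            (hy y (List.mem_cons_self ..)).2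
        | cons b u =>
          rw [show PySem.Chars.join ['_'] (x :: a :: t) = x ++ '_' :: PySem.Chars.join ['_'] (a :: t) by
              simp [PySem.Chars.join, List.intercalate, List.intersperse],
            show PySem.Chars.join ['_'] (y :: b :: u) = y ++ '_' :: PySem.Chars.join ['_'] (b :: u) by
              simp [PySem.Chars.join, List.intercalate, List.intersperse]] at h
          have := pvUnderscoreSplit x y _ _ (hx x (List.mem_cons_self ..)).2
            (hy y (List.mem_cons_self ..)).2 h
          have h2 := ih (b :: u) (fun l hl => hx l (List.mem_cons_of_mem _ hl))
            (fun l hl => hy l (List.mem_cons_of_mem _ hl)) this.2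
          rw [this.1, h2]

theorem pvKeyInj (c c' : List Int) (h : pvKey c = pvKey c') : c = c' := by
  unfold pvKey at h
  have h2 := congrArg String.toList h
  rw [PySem.Str.toList_join, PySem.Str.toList_join] at h2
  simp only [List.map_map] at h2
  have hmap : ∀ l : List Int, List.map (String.toList ∘ fun wi => PySem.Int.toStr wi) l
      = l.map PySem.Int.toChars := by
    intro l; apply List.map_congr_left; intro a _
    simp [PySem.Int.toStr, Function.comp]
  rw [hmap, hmap] at h2
  have hsep : ("_" : String).toList = ['_'] := by decide
  rw [hsep] at h2
  have := pvJoinInj _ _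
    (by intro l hl; obtain ⟨a, _, rfl⟩ := List.mem_map.mp hl
        exact ⟨pvToCharsNeNil a, pvToCharsNoUnderscore a⟩)
    (by intro l hl; obtain ⟨a, _, rfl⟩ := List.mem_map.mp hl
        exact ⟨pvToCharsNeNil a, pvToCharsNoUnderscore a⟩) h2
  exact List.map_injective_iff.mpr (fun a b hab => pvToCharsInj a b hab) this
def pvCov (evs : List (Int × Int)) (w : Int) : Bool := evs.any (fun e => e.2 == w)

def pvFIdx (evs : List (Int × Int)) (w : Int) : Option Int :=
  (evs.find? (fun e => e.2 == w)).map (fun e => e.1)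

theorem pvCovIsSome (evs : List (Int × Int)) (w : Int) :
    pvCov evs w = (pvFIdx evs w).isSome := by
  rw [pvCov, pvFIdx, Option.isSome_map]
  rw [Bool.eq_iff_iff, List.any_eq_true, List.find?_isSome]

theorem pvFirstGet : ∀ (evs : List (Int × Int)) (d : PySem.Dict Int Int) (w : Int),
    (evs.foldl (fun d e => if ¬ d.contains e.2 then d.insert e.2 e.1 else d) d).get? w
      = (d.get? w).or (pvFIdx evs w) := by
  intro evs
  induction evs with
  | nil => intro d w; simp [pvFIdx]
  | cons e evs ih =>
    intro d w
    simp only [List.foldl_cons]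
    by_cases hc : d.contains e.2
    · rw [if_neg (by simpa using hc), ih]
      by_cases hw : e.2 = w
      · subst hw
        rw [PySem.Dict.contains_eq_isSome_get?] at hc
        obtain ⟨v, hv⟩ := Option.isSome_iff_exists.mp hc
        simp [hv, pvFIdx, List.find?_cons, Option.or]
      · have : (e.2 == w) = false := by simpa using hw
        simp [pvFIdx, List.find?_cons, this]
    · rw [if_pos (by simpa using hc), ih]
      by_cases hw : e.2 = w
      · subst hw
        rw [PySem.Dict.contains_eq_isSome_get?] at hc
        have hd : d.get? e.2 = none := by
          cases h : d.get? e.2 with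
          | none => rfl
          | some v => exact absurd (by simp [h]) hc
        simp [PySem.Dict.get?_insert, hd, pvFIdx, List.find?_cons]
      · have hne : (e.2 == w) = false := by simpa using hw
        rw [PySem.Dict.get?_insert]
        rw [if_neg (fun hh => hw hh.symm)]
        simp [pvFIdx, List.find?_cons, hne]

theorem pvSetFoldMem (first : PySem.Dict Int Int) :
    ∀ (g : List Int) (s : PySem.Set Int) (j : Int),
    (j ∈ g.foldl (fun s w => match first.get? w with
        | some i => PySem.Set.add s i
        | none => s) s) ↔ j ∈ s ∨ ∃ w ∈ g, first.get? w = some j := by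
  intro g
  induction g with
  | nil => simp
  | cons w g ih =>
    intro s j
    simp only [List.foldl_cons]
    cases h : first.get? w with
    | none =>
      rw [ih]
      constructor
      · rintro (hs | hw)
        · exact Or.inl hs
        · exact Or.inr ⟨_, by simp [hw.choose_spec], hw.choose_spec.2⟩
      · rintro (hs | ⟨w', hw', hg⟩)
        · exact Or.inl hs
        · rcases List.mem_cons.mp hw' with rfl | hw'
          · rw [h] at hg; exact absurd hg (by simp)
          · exact Or.inr ⟨w', hw', hg⟩
    | some i =>
      rw [ih]
      constructor
      · rintro (hs | hw)
        · rcases (PySem.Set.mem_add _ _ _).mp hs with hs | rfl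
          · exact Or.inl hs
          · exact Or.inr ⟨w, List.mem_cons_self .., h⟩
        · obtain ⟨w', hw', hg⟩ := hw
          exact Or.inr ⟨w', List.mem_cons_of_mem _ hw', hg⟩
      · rintro (hs | ⟨w', hw', hg⟩)
        · exact Or.inl ((PySem.Set.mem_add _ _ _).mpr (Or.inl hs))
        · rcases List.mem_cons.mp hw' with rfl | hw'
          · rw [h] at hg
            exact Or.inl ((PySem.Set.mem_add _ _ _).mpr (Or.inr (by simpa using hg.symm)))
          · exact Or.inr ⟨w', hw', hg⟩

theorem pvRemoveMem (first : PySem.Dict Int Int) :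
    ∀ (groups : List (List Int)) (s : PySem.Set Int) (j : Int),
    (j ∈ groups.foldl (fun s g =>
        if g.all (fun w => first.contains w) then
          g.foldl (fun s w => match first.get? w with
            | some i => PySem.Set.add s i
            | none => s) s
        else s) s)
      ↔ j ∈ s ∨ ∃ g ∈ groups, (∀ w ∈ g, first.contains w = true) ∧
          ∃ w ∈ g, first.get? w = some j := by
  intro groups
  induction groups with
  | nil => simp
  | cons g groups ih =>
    intro s j
    simp only [List.foldl_cons]
    by_cases hall : g.all (fun w => first.contains w) = true
    · rw [if_pos hall, ih, pvSetFoldMem]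
      have hg : ∀ w ∈ g, first.contains w = true := List.all_eq_true.mp hall
      constructor
      · rintro ((hs | hw) | hrest)
        · exact Or.inl hs
        · exact Or.inr ⟨g, List.mem_cons_self .., hg, hw⟩
        · obtain ⟨g', hg', h1, h2⟩ := hrest
          exact Or.inr ⟨g', List.mem_cons_of_mem _ hg', h1, h2⟩
      · rintro (hs | ⟨g', hg', h1, h2⟩)
        · exact Or.inl (Or.inl hs)
        · rcases List.mem_cons.mp hg' with rfl | hg'
          · exact Or.inl (Or.inr h2)
          · exact Or.inr ⟨g', hg', h1, h2⟩
    · rw [if_neg hall, ih]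
      constructor
      · rintro (hs | ⟨g', hg', h1, h2⟩)
        · exact Or.inl hs
        · exact Or.inr ⟨g', List.mem_cons_of_mem _ hg', h1, h2⟩
      · rintro (hs | ⟨g', hg', h1, h2⟩)
        · exact Or.inl hs
        · rcases List.mem_cons.mp hg' with rfl | hg'
          · exact absurd (List.all_eq_true.mpr h1) hall
          · exact Or.inr ⟨g', hg', h1, h2⟩
abbrev pvMatched (c : List Int) (evs : List (Int × Int)) : Prop := ∃ e ∈ evs, e.2 ∈ c

def pvE1 (c : List Int) (evs : List (Int × Int)) : Option (List Bool) :=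
  if pvMatched c evs then some (c.map (pvCov evs)) else none

def pvE2 (c : List Int) (evs : List (Int × Int)) : Option (List (Option Int)) :=
  if pvMatched c evs then some (c.map (pvFIdx evs)) else none

def pvINV (gs : List (List Int)) (evs : List (Int × Int))
    (st : PySem.Dict String (List Bool) × PySem.Dict String (List (Option Int))) : Prop :=
  st.1.keys.Nodup ∧ st.2.keys.Nodup ∧
  (∀ k, st.1.contains k = true → ∃ c ∈ gs, k = pvKey c) ∧
  (∀ c ∈ gs, st.1.get? (pvKey c) = pvE1 c evs ∧ st.2.get? (pvKey c) = pvE2 c evs)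

def pvMID (gs done : List (List Int)) (evs : List (Int × Int)) (e : Int × Int)
    (st : PySem.Dict String (List Bool) × PySem.Dict String (List (Option Int))) : Prop :=
  st.1.keys.Nodup ∧ st.2.keys.Nodup ∧
  (∀ k, st.1.contains k = true → ∃ c ∈ gs, k = pvKey c) ∧
  (∀ c ∈ gs,
    st.1.get? (pvKey c) = (if c ∈ done then pvE1 c (evs ++ [e]) else pvE1 c evs) ∧
    st.2.get? (pvKey c) = (if c ∈ done then pvE2 c (evs ++ [e]) else pvE2 c evs))

theorem pvMatchedAppend (c : List Int) (evs : List (Int × Int)) (e : Int × Int) :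
    pvMatched c (evs ++ [e]) ↔ pvMatched c evs ∨ e.2 ∈ c := by
  simp only [pvMatched, List.mem_append, List.mem_singleton]
  constructor
  · rintro ⟨x, (hx | rfl), hm⟩
    · exact Or.inl ⟨x, hx, hm⟩
    · exact Or.inr hm
  · rintro (⟨x, hx, hm⟩ | hm)
    · exact ⟨x, Or.inl hx, hm⟩
    · exact ⟨e, Or.inr rfl, hm⟩

theorem pvCovAppend (evs : List (Int × Int)) (e : Int × Int) (w : Int) :
    pvCov (evs ++ [e]) w = (pvCov evs w || (e.2 == w)) := by
  simp [pvCov]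

theorem pvFIdxAppend (evs : List (Int × Int)) (e : Int × Int) (w : Int) :
    pvFIdx (evs ++ [e]) w = (pvFIdx evs w).or (if e.2 == w then some e.1 else none) := by
  simp only [pvFIdx, List.find?_append]
  cases h : List.find? (fun e => e.2 == w) evs with
  | none =>
    simp only [Option.none_or]
    by_cases hw : (e.2 == w) = true
    · simp [List.find?_cons, hw]
    · simp [List.find?_cons, hw]
  | some x => simp

theorem pvCovMatched (c : List Int) (evs : List (Int × Int)) (w : Int)
    (hw : w ∈ c) (h : pvCov evs w = true) : pvMatched c evs := by
  obtain ⟨x, hx, hxw⟩ := List.any_eq_true.mp h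
  exact ⟨x, hx, by rw [eq_of_beq hxw]; exact hw⟩

theorem pvNotMatchedCov (c : List Int) (evs : List (Int × Int)) (w : Int)
    (hm : ¬ pvMatched c evs) (hw : w ∈ c) : pvCov evs w = false := by
  by_contra h
  exact hm (pvCovMatched c evs w hw (by simpa using h))

theorem pvNotMatchedFIdx (c : List Int) (evs : List (Int × Int)) (w : Int)
    (hm : ¬ pvMatched c evs) (hw : w ∈ c) : pvFIdx evs w = none := by
  have := pvNotMatchedCov c evs w hm hw
  rw [pvCovIsSome] at this
  exact Option.not_isSome_iff_eq_none.mp (by simp [this])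

theorem pvE1Stable (c : List Int) (evs : List (Int × Int)) (e : Int × Int)
    (h : e.2 ∉ c) : pvE1 c (evs ++ [e]) = pvE1 c evs := by
  unfold pvE1
  have hm : pvMatched c (evs ++ [e]) ↔ pvMatched c evs := by
    rw [pvMatchedAppend]; simp [h]
  rw [if_congr hm rfl rfl]
  split
  · congr 1
    apply List.map_congr_left
    intro w hw
    have : (e.2 == w) = false := beq_eq_false_iff_ne.mpr (fun hh => h (hh ▸ hw))
    simp [pvCovAppend, this]
  · rfl

theorem pvE2Stable (c : List Int) (evs : List (Int × Int)) (e : Int × Int)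
    (h : e.2 ∉ c) : pvE2 c (evs ++ [e]) = pvE2 c evs := by
  unfold pvE2
  have hm : pvMatched c (evs ++ [e]) ↔ pvMatched c evs := by
    rw [pvMatchedAppend]; simp [h]
  rw [if_congr hm rfl rfl]
  split
  · congr 1
    apply List.map_congr_left
    intro w hw
    have : (e.2 == w) = false := beq_eq_false_iff_ne.mpr (fun hh => h (hh ▸ hw))
    simp [pvFIdxAppend, this]
  · rfl

theorem pvMidStep (gs done : List (List Int)) (evs : List (Int × Int)) (e : Int × Int)
    (st : PySem.Dict String (List Bool) × PySem.Dict String (List (Option Int)))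
    (c0 : List Int) (hc0 : c0 ∈ gs) (h : pvMID gs done evs e st) :
    pvMID gs (done ++ [c0]) evs e (pvGroupStep e.1 e.2 st c0) := by
  obtain ⟨hnd1, hnd2, hcont, hspec⟩ := h
  by_cases horig : e.2 ∈ c0
  case neg =>
    -- the group is untouched by this event
    rw [pvGroupStep, if_neg horig]
    refine ⟨hnd1, hnd2, hcont, ?_⟩
    intro c hc
    obtain ⟨h1, h2⟩ := hspec c hc
    by_cases hcd : c ∈ done ++ [c0]
    · rcases List.mem_append.mp hcd with hcd | hcd
      · rw [if_pos hcd] at h1 h2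
        rw [if_pos (List.mem_append.mpr (Or.inl hcd)), if_pos (List.mem_append.mpr (Or.inl hcd))]
        exact ⟨h1, h2⟩
      · simp only [List.mem_singleton] at hcd
        subst hcd
        have hin : c ∈ done ++ [c] := List.mem_append.mpr (Or.inr (List.mem_singleton.mpr rfl))
        rw [if_pos hin, if_pos hin, pvE1Stable c evs e horig, pvE2Stable c evs e horig]
        by_cases hd : c ∈ done
        · rw [if_pos hd] at h1 h2
          rw [pvE1Stable c evs e horig] at h1
          rw [pvE2Stable c evs e horig] at h2
          exact ⟨h1, h2⟩
        · rw [if_neg hd] at h1 h2; exact ⟨h1, h2⟩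
    · have hd : c ∉ done := fun hd => hcd (List.mem_append.mpr (Or.inl hd))
      rw [if_neg hcd, if_neg hcd]
      rw [if_neg hd] at h1 h2
      exact ⟨h1, h2⟩
  case pos =>
    rw [pvGroupStep, if_pos horig]
    simp only
    -- key facts about e.2 == w for member w
    have hbeq : ∀ w : Int, (w == e.2) = (e.2 == w) := by
      intro w
      by_cases h : w = e.2
      · subst h; rfl
      · rw [beq_eq_false_iff_ne.mpr h, beq_eq_false_iff_ne.mpr (Ne.symm h)]
    cases hget : st.1.get? (pvKey c0) with
    | none =>
      -- first time this key is seen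
      have hc0d : c0 ∉ done := by
        intro hd
        have := (hspec c0 hc0).1
        rw [if_pos hd, hget] at this
        unfold pvE1 at this
        rw [if_pos ((pvMatchedAppend c0 evs e).mpr (Or.inr horig))] at this
        exact absurd this.symm (by simp)
      have hm : ¬ pvMatched c0 evs := by
        intro hm
        have := (hspec c0 hc0).1
        rw [if_neg hc0d, hget] at this
        unfold pvE1 at this
        rw [if_pos hm] at this
        exact absurd this.symm (by simp)
      have hget2 : st.2.get? (pvKey c0) = none := by
        have := (hspec c0 hc0).2
        rw [if_neg hc0d] at this
        unfold pvE2 at this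
        rw [if_neg hm] at this
        exact this
      refine ⟨PySem.Dict.nodup_keys_insert _ _ _ hnd1, PySem.Dict.nodup_keys_insert _ _ _ hnd2, ?_, ?_⟩
      · intro k hk
        rw [PySem.Dict.contains_insert] at hk
        rcases Bool.or_eq_true_iff.mp hk with hk | hk
        · exact ⟨c0, hc0, (eq_of_beq hk)⟩
        · exact hcont k hk
      · intro c hc
        by_cases hcc : pvKey c = pvKey c0
        · have : c = c0 := pvKeyInj _ _ hcc
          subst this
          rw [PySem.Dict.get?_insert, if_pos rfl, PySem.Dict.get?_insert, if_pos rfl]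
          have hin : c ∈ done ++ [c] := List.mem_append.mpr (Or.inr (List.mem_singleton.mpr rfl))
          rw [if_pos hin, if_pos hin]
          constructor
          · unfold pvE1
            rw [if_pos ((pvMatchedAppend c evs e).mpr (Or.inr horig))]
            congr 1
            apply List.map_congr_left
            intro w hw
            rw [pvCovAppend, pvNotMatchedCov c evs w hm hw, Bool.false_or, hbeq w]
          · unfold pvE2
            rw [if_pos ((pvMatchedAppend c evs e).mpr (Or.inr horig))]
            congr 1
            apply List.map_congr_left
            intro w hw
            rw [pvFIdxAppend, pvNotMatchedFIdx c evs w hm hw, Option.none_or, hbeq w]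
        · rw [PySem.Dict.get?_insert, if_neg hcc, PySem.Dict.get?_insert, if_neg hcc]
          have hcne : c ≠ c0 := fun hh => hcc (hh ▸ rfl)
          have hmem : (c ∈ done ++ [c0]) ↔ c ∈ done := by
            simp [List.mem_append, hcne]
          rw [if_congr hmem rfl rfl, if_congr hmem rfl rfl]
          exact hspec c hc
    | some value =>
      -- merge with the existing entry
      have h1 := (hspec c0 hc0).1
      have h2 := (hspec c0 hc0).2
      by_cases hc0d : c0 ∈ done
      case pos =>
        rw [if_pos hc0d, hget] at h1
        rw [if_pos hc0d] at h2
        unfold pvE1 at h1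
        unfold pvE2 at h2
        have hmm : pvMatched c0 (evs ++ [e]) := (pvMatchedAppend c0 evs e).mpr (Or.inr horig)
        rw [if_pos hmm] at h1 h2
        have hval : value = c0.map (pvCov (evs ++ [e])) := Option.some_inj.mp h1
        have hval2 : (st.2.get? (pvKey c0)).getD [] = c0.map (pvFIdx (evs ++ [e])) := by
          rw [h2]; rfl
        refine ⟨PySem.Dict.nodup_keys_insert _ _ _ hnd1, PySem.Dict.nodup_keys_insert _ _ _ hnd2, ?_, ?_⟩
        · intro k hk
          rw [PySem.Dict.contains_insert] at hk
          rcases Bool.or_eq_true_iff.mp hk with hk | hk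
          · exact ⟨c0, hc0, (eq_of_beq hk)⟩
          · exact hcont k hk
        · intro c hc
          by_cases hcc : pvKey c = pvKey c0
          · have : c = c0 := pvKeyInj _ _ hcc
            subst this
            rw [PySem.Dict.get?_insert, if_pos rfl, PySem.Dict.get?_insert, if_pos rfl]
            have hin : c ∈ done ++ [c] := List.mem_append.mpr (Or.inr (List.mem_singleton.mpr rfl))
            rw [if_pos hin, if_pos hin]
            rw [hval, hval2]
            rw [List.zip_map', List.zip_map', List.map_map, List.map_map]
            constructor
            · unfold pvE1
              rw [if_pos hmm]
              congr 1
              apply List.map_congr_left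
              intro w hw
              simp only [Function.comp]
              by_cases hwo : (w == e.2) = true
              · have he2 : (e.2 == w) = true := by rw [← hbeq w]; exact hwo
                have hcv : pvCov (evs ++ [e]) w = true := by
                  rw [pvCovAppend, he2, Bool.or_true]
                rw [hwo, hcv]; rfl
              · have hfo : (w == e.2) = false := by simpa using hwo
                rw [hfo, Bool.false_or]
            · unfold pvE2
              rw [if_pos hmm]
              congr 1
              apply List.map_congr_left
              intro w hw
              simp only [Function.comp]
              by_cases hwo : (w == e.2) = true
              · have he2 : (e.2 == w) = true := by rw [← hbeq w]; exact hwo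
                rw [if_pos hwo]
                rw [pvFIdxAppend, if_pos he2]
                cases hfi : pvFIdx evs w with
                | none => simp [pvUpdate]
                | some x => simp [pvUpdate]
              · rw [if_neg hwo]
                cases hfi : pvFIdx (evs ++ [e]) w <;> simp [pvUpdate, hfi]
          · rw [PySem.Dict.get?_insert, if_neg hcc, PySem.Dict.get?_insert, if_neg hcc]
            have hcne : c ≠ c0 := fun hh => hcc (hh ▸ rfl)
            have hmem : (c ∈ done ++ [c0]) ↔ c ∈ done := by
              simp [List.mem_append, hcne]
            rw [if_congr hmem rfl rfl, if_congr hmem rfl rfl]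
            exact hspec c hc
      case neg =>
        rw [if_neg hc0d, hget] at h1
        rw [if_neg hc0d] at h2
        unfold pvE1 at h1
        unfold pvE2 at h2
        have hm : pvMatched c0 evs := by
          by_contra hm
          rw [if_neg hm] at h1
          exact absurd h1.symm (by simp)
        rw [if_pos hm] at h1 h2
        have hval : value = c0.map (pvCov evs) := Option.some_inj.mp h1
        have hval2 : (st.2.get? (pvKey c0)).getD [] = c0.map (pvFIdx evs) := by
          rw [h2]; rfl
        have hmm : pvMatched c0 (evs ++ [e]) := (pvMatchedAppend c0 evs e).mpr (Or.inr horig)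
        refine ⟨PySem.Dict.nodup_keys_insert _ _ _ hnd1, PySem.Dict.nodup_keys_insert _ _ _ hnd2, ?_, ?_⟩
        · intro k hk
          rw [PySem.Dict.contains_insert] at hk
          rcases Bool.or_eq_true_iff.mp hk with hk | hk
          · exact ⟨c0, hc0, (eq_of_beq hk)⟩
          · exact hcont k hk
        · intro c hc
          by_cases hcc : pvKey c = pvKey c0
          · have : c = c0 := pvKeyInj _ _ hcc
            subst this
            rw [PySem.Dict.get?_insert, if_pos rfl, PySem.Dict.get?_insert, if_pos rfl]
            have hin : c ∈ done ++ [c] := List.mem_append.mpr (Or.inr (List.mem_singleton.mpr rfl))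
            rw [if_pos hin, if_pos hin]
            rw [hval, hval2]
            rw [List.zip_map', List.zip_map', List.map_map, List.map_map]
            constructor
            · unfold pvE1
              rw [if_pos hmm]
              congr 1
              apply List.map_congr_left
              intro w hw
              simp only [Function.comp]
              rw [pvCovAppend, hbeq w, Bool.or_comm]
            · unfold pvE2
              rw [if_pos hmm]
              congr 1
              apply List.map_congr_left
              intro w hw
              simp only [Function.comp]
              rw [pvFIdxAppend, hbeq w]
              cases hfi : pvFIdx evs w with
              | none => simp [pvUpdate]
              | some x => simp [pvUpdate]
          · rw [PySem.Dict.get?_insert, if_neg hcc, PySem.Dict.get?_insert, if_neg hcc]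
            have hcne : c ≠ c0 := fun hh => hcc (hh ▸ rfl)
            have hmem : (c ∈ done ++ [c0]) ↔ c ∈ done := by
              simp [List.mem_append, hcne]
            rw [if_congr hmem rfl rfl, if_congr hmem rfl rfl]
            exact hspec c hc

theorem pvMidFold (gs : List (List Int)) (evs : List (Int × Int)) (e : Int × Int) :
    ∀ (ts done : List (List Int))
      (st : PySem.Dict String (List Bool) × PySem.Dict String (List (Option Int))),
    (∀ c ∈ ts, c ∈ gs) → pvMID gs done evs e st →
    pvMID gs (done ++ ts) evs e (ts.foldl (pvGroupStep e.1 e.2) st) := by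
  intro ts
  induction ts with
  | nil => intro done st _ h; simpa using h
  | cons c0 ts ih =>
    intro done st hts h
    simp only [List.foldl_cons]
    have := ih (done ++ [c0]) (pvGroupStep e.1 e.2 st c0)
      (fun c hc => hts c (List.mem_cons_of_mem _ hc))
      (pvMidStep gs done evs e st c0 (hts c0 (List.mem_cons_self ..)) h)
    simpa [List.append_assoc] using this

theorem pvRunINV (gs : List (List Int)) : ∀ (evs : List (Int × Int)),
    pvINV gs evs (evs.foldl (fun st e => gs.foldl (pvGroupStep e.1 e.2) st)
      ((PySem.Dict.empty, PySem.Dict.empty))) := by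
  intro evs
  induction evs using List.reverseRecOn with
  | nil =>
    simp only [List.foldl_nil]
    refine ⟨by simp [PySem.Dict.nodup_keys_empty], by simp [PySem.Dict.nodup_keys_empty], ?_, ?_⟩
    · intro k hk; rw [PySem.Dict.contains_empty] at hk; exact absurd hk (by simp)
    · intro c hc
      have hm : ¬ pvMatched c [] := by simp [pvMatched]
      simp [pvE1, pvE2, hm, PySem.Dict.get?_empty]
  | append_singleton evs e ih =>
    rw [List.foldl_append]
    simp only [List.foldl_cons, List.foldl_nil]
    have hmid : pvMID gs [] evs e (evs.foldl (fun st e => gs.foldl (pvGroupStep e.1 e.2) st)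
        ((PySem.Dict.empty, PySem.Dict.empty))) := by
      obtain ⟨a1, a2, a3, a4⟩ := ih
      exact ⟨a1, a2, a3, fun c hc => by simpa using a4 c hc⟩
    have := pvMidFold gs evs e gs [] _ (fun c hc => hc) hmid
    obtain ⟨a1, a2, a3, a4⟩ := this
    refine ⟨a1, a2, a3, ?_⟩
    intro c hc
    have := a4 c hc
    rw [if_pos (by simpa using hc), if_pos (by simpa using hc)] at this
    exact this
-- ---- success-list characterization ----

theorem pvBoolsumLe (v : List Bool) :
    (v.map (fun b => if b then (1 : Int) else 0)).sum ≤ (v.length : Int) := by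
  induction v with
  | nil => simp
  | cons b v ih =>
    simp only [List.map_cons, List.sum_cons, List.length_cons]
    split <;> push_cast <;> omega

theorem pvBoolsumIff (v : List Bool) :
    ((v.map (fun b => if b then (1 : Int) else 0)).sum = (v.length : Int)) ↔ ∀ b ∈ v, b = true := by
  induction v with
  | nil => simp
  | cons b v ih =>
    simp only [List.map_cons, List.sum_cons, List.length_cons, List.mem_cons]
    have hle := pvBoolsumLe v
    constructor
    · intro h
      have hb : b = true := by
        by_contra hb
        simp only [Bool.not_eq_true] at hb
        subst hb
        simp only [Bool.false_eq_true, if_false] at h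
        push_cast at h
        omega
      subst hb
      simp only [if_pos rfl] at h
      push_cast at h
      intro x hx
      rcases hx with rfl | hx
      · rfl
      · exact ih.mp (by omega) x hx
    · intro h
      have hb : b = true := h b (Or.inl rfl)
      subst hb
      rw [if_pos rfl]
      have := ih.mpr (fun x hx => h x (Or.inr hx))
      push_cast
      omega

theorem pvSuccessFold (cond : List Bool → Prop) [DecidablePred cond] :
    ∀ (l : List (String × List Bool)) (acc : List String) (k : String),
    (k ∈ l.foldl (fun acc kv => if cond kv.2 then acc ++ [kv.1] else acc) acc) ↔
      k ∈ acc ∨ ∃ v, (k, v) ∈ l ∧ cond v := by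
  intro l
  induction l with
  | nil => simp
  | cons kv l ih =>
    intro acc k
    simp only [List.foldl_cons]
    by_cases hc : cond kv.2
    · rw [if_pos hc, ih]
      constructor
      · rintro (hk | ⟨v, hv, hcv⟩)
        · rcases List.mem_append.mp hk with hk | hk
          · exact Or.inl hk
          · simp only [List.mem_singleton] at hk
            subst hk
            exact Or.inr ⟨kv.2, List.mem_cons_self, hc⟩
        · exact Or.inr ⟨v, List.mem_cons_of_mem _ hv, hcv⟩
      · rintro (hk | ⟨v, hv, hcv⟩)
        · exact Or.inl (List.mem_append.mpr (Or.inl hk))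
        · rcases List.mem_cons.mp hv with hv | hv
          · exact Or.inl (List.mem_append.mpr (Or.inr (by simp [← hv])))
          · exact Or.inr ⟨v, hv, hcv⟩
    · rw [if_neg hc, ih]
      constructor
      · rintro (hk | ⟨v, hv, hcv⟩)
        · exact Or.inl hk
        · exact Or.inr ⟨v, List.mem_cons_of_mem _ hv, hcv⟩
      · rintro (hk | ⟨v, hv, hcv⟩)
        · exact Or.inl hk
        · rcases List.mem_cons.mp hv with hv | hv
          · exact absurd (by rw [show v = kv.2 from congrArg Prod.snd hv] at hcv; exact hcv) hc
          · exact Or.inr ⟨v, hv, hcv⟩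

theorem pvSuccessMem (d : PySem.Dict String (List Bool)) (k : String) :
    k ∈ pvSuccess d ↔
      ∃ v, (k, v) ∈ d.items ∧ ((v.map (fun b => if b then (1 : Int) else 0)).sum = (v.length : Int)) := by
  unfold pvSuccess
  rw [pvSuccessFold (fun v => (v.map (fun b => if b then (1 : Int) else 0)).sum = (v.length : Int))]
  simp

-- ---- marking characterization ----

theorem pvSetFoldLen (ops : List (Option Int)) : ∀ (a : List String),
    (ops.foldl (fun pw wi => match wi with
      | some i => PySem.List.pySetD pw i "[TO BE REMOVED]"
      | none => pw) a).length = a.length := by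
  induction ops with
  | nil => intro a; rfl
  | cons o ops ih =>
    intro a
    cases o with
    | none => exact ih a
    | some i => rw [List.foldl_cons]; rw [ih]; exact PySem.List.length_pySetD ..

theorem pvSetFoldGet (ops : List (Option Int)) : ∀ (a : List String) (j : Nat),
    (∀ i : Int, some i ∈ ops → 0 ≤ i) →
    (ops.foldl (fun pw wi => match wi with
      | some i => PySem.List.pySetD pw i "[TO BE REMOVED]"
      | none => pw) a)[j]? =
      if some (j : Int) ∈ ops ∧ j < a.length then some "[TO BE REMOVED]" else a[j]? := by
  induction ops with
  | nil => intro a j _; simp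
  | cons o ops ih =>
    intro a j hnn
    cases o with
    | none =>
      rw [List.foldl_cons]
      rw [ih a j (fun i hi => hnn i (List.mem_cons_of_mem _ hi))]
      have : (some (j : Int) ∈ (none :: ops : List (Option Int))) ↔ some (j : Int) ∈ ops := by
        simp
      rw [if_congr (and_congr_left' this) rfl rfl]
    | some i =>
      rw [List.foldl_cons]
      have hi0 : 0 ≤ i := hnn i List.mem_cons_self
      rw [ih _ j (fun i hi => hnn i (List.mem_cons_of_mem _ hi))]
      dsimp only
      rw [PySem.List.length_pySetD, PySem.List.pySetD_of_nonneg _ _ hi0]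
      by_cases hij : i = (j : Int)
      · have hmem : some (j : Int) ∈ (some i :: ops : List (Option Int)) := by
          rw [hij]; exact List.mem_cons_self
        by_cases hj : j < a.length
        · rw [if_pos (show some (j : Int) ∈ (some i :: ops : List (Option Int)) ∧ j < a.length from
            ⟨hmem, hj⟩)]
          by_cases hops : some (j : Int) ∈ ops
          · rw [if_pos (show some (j : Int) ∈ ops ∧ j < a.length from ⟨hops, hj⟩)]
          · rw [if_neg (show ¬(some (j : Int) ∈ ops ∧ j < a.length) from fun hh => hops hh.1)]
            rw [show i.toNat = j by omega, List.getElem?_set_self hj]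
        · rw [if_neg (show ¬(some (j : Int) ∈ ops ∧ j < a.length) from fun hh => hj hh.2),
              if_neg (show ¬(some (j : Int) ∈ (some i :: ops : List (Option Int)) ∧ j < a.length) from
                fun hh => hj hh.2)]
          rw [List.getElem?_eq_none (l := a.set i.toNat "[TO BE REMOVED]") (by simp; omega),
            List.getElem?_eq_none (by omega)]
      · have hne : i.toNat ≠ j := by omega
        rw [List.getElem?_set_ne hne]
        have hmem : (some (j : Int) ∈ (some i :: ops : List (Option Int))) ↔ some (j : Int) ∈ ops := by
          simp only [List.mem_cons, Option.some.injEq]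
          constructor
          · rintro (h | h)
            · exact absurd h.symm hij
            · exact h
          · exact Or.inr
        rw [if_congr (and_congr_left' hmem) rfl rfl]

theorem pvMarkLen (di : PySem.Dict String (List (Option Int))) : ∀ (keys : List String) (a : List String),
    (pvMark di keys a).length = a.length := by
  intro keys
  induction keys with
  | nil => intro a; rfl
  | cons k keys ih =>
    intro a
    unfold pvMark at ih ⊢
    rw [List.foldl_cons, ih, pvSetFoldLen]

theorem pvMarkGet (di : PySem.Dict String (List (Option Int))) :
    ∀ (keys : List String) (a : List String) (j : Nat),
    (∀ k ∈ keys, ∀ i : Int, some i ∈ di.getD k [] → 0 ≤ i) →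
    (pvMark di keys a)[j]? =
      if (∃ k ∈ keys, some (j : Int) ∈ di.getD k []) ∧ j < a.length then
        some "[TO BE REMOVED]"
      else a[j]? := by
  intro keys
  induction keys with
  | nil => intro a j _; simp [pvMark]
  | cons k keys ih =>
    intro a j hnn
    unfold pvMark at ih ⊢
    rw [List.foldl_cons]
    rw [ih _ j (fun k' hk' => hnn k' (List.mem_cons_of_mem _ hk'))]
    rw [pvSetFoldLen]
    rw [pvSetFoldGet _ _ _ (hnn k List.mem_cons_self)]
    by_cases hj : j < a.length
    · by_cases hrest : ∃ k' ∈ keys, some (j : Int) ∈ di.getD k' []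
      · obtain ⟨k', hk', hm⟩ := hrest
        rw [if_pos (show (∃ k' ∈ keys, some (j : Int) ∈ di.getD k' []) ∧ j < a.length from
            ⟨⟨k', hk', hm⟩, hj⟩),
          if_pos (show (∃ k' ∈ k :: keys, some (j : Int) ∈ di.getD k' []) ∧ j < a.length from
            ⟨⟨k', List.mem_cons_of_mem _ hk', hm⟩, hj⟩)]
      · rw [if_neg (show ¬((∃ k' ∈ keys, some (j : Int) ∈ di.getD k' []) ∧ j < a.length) from
            fun hh => hrest hh.1)]
        by_cases hk : some (j : Int) ∈ di.getD k []
        · rw [if_pos (show some (j : Int) ∈ di.getD k [] ∧ j < a.length from ⟨hk, hj⟩),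
            if_pos (show (∃ k' ∈ k :: keys, some (j : Int) ∈ di.getD k' []) ∧ j < a.length from
              ⟨⟨k, List.mem_cons_self, hk⟩, hj⟩)]
        · rw [if_neg (show ¬(some (j : Int) ∈ di.getD k [] ∧ j < a.length) from fun hh => hk hh.1),
            if_neg (show ¬((∃ k' ∈ k :: keys, some (j : Int) ∈ di.getD k' []) ∧ j < a.length) from by
              rintro ⟨⟨k', hk', hm⟩, -⟩
              rcases List.mem_cons.mp hk' with rfl | hk'
              · exact hk hm
              · exact hrest ⟨k', hk', hm⟩)]
    · rw [if_neg (show ¬((∃ k' ∈ keys, some (j : Int) ∈ di.getD k' []) ∧ j < a.length) from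
          fun hh => hj hh.2),
        if_neg (show ¬(some (j : Int) ∈ di.getD k [] ∧ j < a.length) from fun hh => hj hh.2),
        if_neg (show ¬((∃ k' ∈ k :: keys, some (j : Int) ∈ di.getD k' []) ∧ j < a.length) from
          fun hh => hj hh.2)]
-- ---- the event list both loops consume ----

def pvEvs (al : List (String × Int)) (tags : List String) : List (Int × Int) :=
  ((PySem.List.enumerate (List.zip al tags)).filter (fun q => decide (q.2.2 = "E"))).map
    (fun q => (q.1, q.2.1.2))

theorem pvFoldlGuardP {σ α β : Type} (p : α → Prop) [DecidablePred p] (e : α → β) (F : σ → β → σ) :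
    ∀ (l : List α) (s : σ),
    l.foldl (fun s q => if p q then F s (e q) else s) s
      = ((l.filter (fun q => decide (p q))).map e).foldl F s := by
  intro l
  induction l with
  | nil => intro s; rfl
  | cons a l ih =>
    intro s
    by_cases hp : p a
    · simp only [List.foldl_cons, if_pos hp]
      rw [ih]
      simp [List.filter_cons, hp]
    · simp only [List.foldl_cons, if_neg hp]
      rw [ih]
      simp [List.filter_cons, hp]

theorem pvZipEnum (al : List (String × Int)) (tags : List String) :
    List.zip (List.zip (PySem.List.pyRange 0 (al.length : Int) 1) al) tags
      = (PySem.List.enumerate (List.zip al tags)).map (fun q => ((q.1, q.2.1), q.2.2)) := by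
  apply List.ext_getElem
  · simp [PySem.List.pyRange_zero_natCast, PySem.List.length_enumerate]
    try omega
  · intro k h1 h2
    have hk1 : k < al.length := by
      simp [PySem.List.pyRange_zero_natCast] at h1; omega
    have hk2 : k < tags.length := by
      simp [PySem.List.pyRange_zero_natCast] at h1; omega
    simp [List.getElem_zip, PySem.List.getElem_enumerate, List.getElem_map,
      PySem.List.pyRange_zero_natCast, hk1, hk2]

theorem pvEvsNonneg (al : List (String × Int)) (tags : List String) :
    ∀ x ∈ pvEvs al tags, 0 ≤ x.1 := by
  intro x hx
  obtain ⟨q, hq, rfl⟩ := List.mem_map.mp hx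
  have hq2 := List.mem_filter.mp hq
  obtain ⟨k, hk, hqe⟩ := (PySem.List.mem_enumerate_iff _ _ _).mp hq2.1
  rw [hqe]
  simp

theorem pvLoopGuard (wrets prets : List (List Int))
    (l : List (Int × ((String × Int) × String)))
    (s : (PySem.Dict String (List Bool) × PySem.Dict String (List (Option Int))) ×
         (PySem.Dict String (List Bool) × PySem.Dict String (List (Option Int)))) :
    l.foldl (fun st q =>
        if q.2.2 = "E" then
          (wrets.foldl (pvGroupStep q.1 q.2.1.2) st.1, prets.foldl (pvGroupStep q.1 q.2.1.2) st.2)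
        else st) s
      = ((l.filter (fun q => decide (q.2.2 = "E"))).map (fun q => (q.1, q.2.1.2))).foldl
          (fun st e =>
            (wrets.foldl (pvGroupStep e.1 e.2) st.1, prets.foldl (pvGroupStep e.1 e.2) st.2)) s :=
  pvFoldlGuardP (fun q => q.2.2 = "E") (fun q => (q.1, q.2.1.2))
    (fun st e => (wrets.foldl (pvGroupStep e.1 e.2) st.1, prets.foldl (pvGroupStep e.1 e.2) st.2)) l s

theorem pvLoopAEq (al : List (String × Int)) (tags : List String)
    (wrets prets : List (List Int)) :
    pvLoopA al tags wrets prets =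
      ((pvEvs al tags).foldl (fun st e => wrets.foldl (pvGroupStep e.1 e.2) st)
        (PySem.Dict.empty, PySem.Dict.empty),
       (pvEvs al tags).foldl (fun st e => prets.foldl (pvGroupStep e.1 e.2) st)
        (PySem.Dict.empty, PySem.Dict.empty)) := by
  unfold pvLoopA
  rw [pvZipEnum, List.foldl_map]
  have hfun : (fun (st : (PySem.Dict String (List Bool) × PySem.Dict String (List (Option Int))) ×
        (PySem.Dict String (List Bool) × PySem.Dict String (List (Option Int))))
        (q : Int × ((String × Int) × String)) =>
        if ((((q.1, q.2.1), q.2.2) : (Int × (String × Int)) × String).2 ≠ "E") then st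
        else
          (wrets.foldl (pvGroupStep ((q.1, q.2.1), q.2.2).1.1 ((q.1, q.2.1), q.2.2).1.2.2) st.1,
           prets.foldl (pvGroupStep ((q.1, q.2.1), q.2.2).1.1 ((q.1, q.2.1), q.2.2).1.2.2) st.2))
      = (fun st q =>
        if q.2.2 = "E" then
          (wrets.foldl (pvGroupStep q.1 q.2.1.2) st.1, prets.foldl (pvGroupStep q.1 q.2.1.2) st.2)
        else st) := by
    funext st q
    by_cases h : q.2.2 = "E"
    · simp [h]
    · simp [h]
  rw [hfun, pvLoopGuard]
  rw [PySem.List.foldl_prod_mk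
    (f := fun s1 (e : Int × Int) => wrets.foldl (pvGroupStep e.1 e.2) s1)
    (g := fun s2 (e : Int × Int) => prets.foldl (pvGroupStep e.1 e.2) s2)]
  rfl

theorem pvFirstGuard (l : List (Int × ((String × Int) × String))) (d : PySem.Dict Int Int) :
    l.foldl (fun d q =>
        if q.2.2 = "E" then
          (if ¬ d.contains q.2.1.2 then d.insert q.2.1.2 q.1 else d)
        else d) d
      = ((l.filter (fun q => decide (q.2.2 = "E"))).map (fun q => (q.1, q.2.1.2))).foldl
          (fun d e => if ¬ d.contains e.2 then d.insert e.2 e.1 else d) d :=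
  pvFoldlGuardP (fun q => q.2.2 = "E") (fun q => (q.1, q.2.1.2))
    (fun d e => if ¬ d.contains e.2 then d.insert e.2 e.1 else d) l d

theorem pvFirstBEq (al : List (String × Int)) (tags : List String) (w : Int) :
    (pvFirstB al tags).get? w = pvFIdx (pvEvs al tags) w := by
  unfold pvFirstB
  have hfun : (fun (d : PySem.Dict Int Int) (q : Int × ((String × Int) × String)) =>
        if q.2.2 = "E" ∧ ¬ d.contains q.2.1.2 then d.insert q.2.1.2 q.1 else d)
      = (fun d q =>
        if q.2.2 = "E" then
          (if ¬ d.contains q.2.1.2 then d.insert q.2.1.2 q.1 else d)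
        else d) := by
    funext d q
    by_cases h1 : q.2.2 = "E" <;> by_cases h2 : d.contains q.2.1.2 <;> simp [h1, h2]
  rw [hfun, pvFirstGuard, pvFirstGet, PySem.Dict.get?_empty]
  rfl
-- ---- words produced by split() contain no whitespace, hence never the sentinel ----

theorem pvGoNil (cur : List Char) (acc : List (List Char)) :
    PySem.Chars.split₀.go [] cur acc =
      if cur.isEmpty then acc.reverse else (cur.reverse :: acc).reverse := by
  rw [PySem.Chars.split₀.go.eq_def]

theorem pvGoCons (c : Char) (rest cur : List Char) (acc : List (List Char)) :
    PySem.Chars.split₀.go (c :: rest) cur acc =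
      if PySem.Chars.isspace c then
        (if cur.isEmpty then PySem.Chars.split₀.go rest [] acc
         else PySem.Chars.split₀.go rest [] (cur.reverse :: acc))
      else PySem.Chars.split₀.go rest (c :: cur) acc := by
  rw [PySem.Chars.split₀.go.eq_def]

theorem pvSplitGoNoSpace : ∀ (s cur : List Char) (acc : List (List Char)),
    (∀ c ∈ cur, PySem.Chars.isspace c = false) →
    (∀ w ∈ acc, ∀ c ∈ w, PySem.Chars.isspace c = false) →
    ∀ w ∈ PySem.Chars.split₀.go s cur acc, ∀ c ∈ w, PySem.Chars.isspace c = false := by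
  intro s
  induction s with
  | nil =>
    intro cur acc hcur hacc w hw
    rw [pvGoNil] at hw
    split at hw
    · exact hacc w (by simpa using hw)
    · simp only [List.mem_reverse] at hw
      rcases List.mem_cons.mp hw with rfl | hw
      · intro c hc; exact hcur c (by simpa using hc)
      · exact hacc w hw
  | cons c rest ih =>
    intro cur acc hcur hacc w hw
    rw [pvGoCons] at hw
    split at hw
    · split at hw
      · exact ih [] acc (by simp) hacc w hw
      · refine ih [] (cur.reverse :: acc) (by simp) ?_ w hw
        intro w' hw'
        rcases List.mem_cons.mp hw' with rfl | hw'
        · intro c' hc'; exact hcur c' (by simpa using hc')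
        · exact hacc w' hw'
    · next hsp =>
      refine ih (c :: cur) acc ?_ hacc w hw
      intro c' hc'
      rcases List.mem_cons.mp hc' with rfl | hc'
      · simpa using hsp
      · exact hcur c' hc'

theorem pvSplit₀NoSpace (p : String) :
    ∀ w ∈ PySem.Str.split₀ p, ∀ c ∈ w.toList, PySem.Chars.isspace c = false := by
  intro w hw
  unfold PySem.Str.split₀ at hw
  obtain ⟨cs, hcs, rfl⟩ := List.mem_map.mp hw
  unfold PySem.Chars.split₀ at hcs
  intro c hc
  have := pvSplitGoNoSpace p.toList [] [] (by simp) (by simp) cs hcs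
  exact this c (by simpa using hc)

theorem pvSliceMem {α : Type} (xs : List α) (a b : Option Int) (st : Int) (hst : st ≠ 0) :
    ∀ w ∈ (PySem.List.slice? xs a b st).getD [], w ∈ xs := by
  intro w hw
  unfold PySem.List.slice? at hw
  rw [if_neg hst] at hw
  rcases hsi : PySem.List.sliceIndices xs.length a b st with ⟨s, e, stp⟩
  rw [hsi] at hw
  simp only [Option.getD_some] at hw
  obtain ⟨k, _, hk⟩ := List.mem_filterMap.mp hw
  exact List.mem_of_getElem? hk

theorem pvNoSent (p : String) :
    ∀ w ∈ (PySem.List.slice? (PySem.Str.split₀ p) none none 2).getD [],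
      w ≠ "[TO BE REMOVED]" := by
  intro w hw heq
  have hmem : w ∈ PySem.Str.split₀ p := pvSliceMem _ _ _ _ (by norm_num) w hw
  have := pvSplit₀NoSpace p w hmem ' ' (by rw [heq]; decide)
  exact absurd this (by decide)
-- ---- tying A's success/mark data to the event characterization ----

theorem pvFIdxNonneg (al : List (String × Int)) (tags : List String) (w i : Int)
    (h : pvFIdx (pvEvs al tags) w = some i) : 0 ≤ i := by
  unfold pvFIdx at h
  cases hf : List.find? (fun e => e.2 == w) (pvEvs al tags) with
  | none => rw [hf] at h; exact absurd h (by simp)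
  | some e =>
    rw [hf] at h
    simp only [Option.map_some, Option.some_inj] at h
    rw [← h]
    exact pvEvsNonneg al tags e (List.mem_of_find?_eq_some hf)

theorem pvSuccElim (E : List (Int × Int)) (gs : List (List Int))
    (st : PySem.Dict String (List Bool) × PySem.Dict String (List (Option Int)))
    (hINV : pvINV gs E st) (k : String) (hk : k ∈ pvSuccess st.1) :
    ∃ c ∈ gs, k = pvKey c ∧ st.2.getD k [] = c.map (pvFIdx E) ∧
      (∀ w ∈ c, pvCov E w = true) := by
  obtain ⟨hnd1, hnd2, hcont, hspec⟩ := hINV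
  obtain ⟨v, hkv, hsum⟩ := (pvSuccessMem st.1 k).mp hk
  have hget : st.1.get? k = some v := PySem.Dict.get?_of_mem_items _ hkv hnd1
  have hcontk : st.1.contains k = true := by
    rw [PySem.Dict.contains_eq_isSome_get?, hget]; rfl
  obtain ⟨c, hc, rfl⟩ := hcont k hcontk
  have h1 := (hspec c hc).1
  have h2 := (hspec c hc).2
  rw [hget] at h1
  unfold pvE1 at h1
  by_cases hm : pvMatched c E
  · rw [if_pos hm] at h1
    unfold pvE2 at h2
    rw [if_pos hm] at h2
    refine ⟨c, hc, rfl, ?_, ?_⟩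
    · rw [PySem.Dict.getD_eq_get?_getD, h2]; rfl
    · have hv : v = c.map (pvCov E) := Option.some_inj.mp h1
      subst hv
      have := (pvBoolsumIff _).mp hsum
      intro w hw
      exact this (pvCov E w) (List.mem_map.mpr ⟨w, hw, rfl⟩)
  · rw [if_neg hm] at h1
    exact absurd h1.symm (by simp)

theorem pvSuccIntro (E : List (Int × Int)) (gs : List (List Int))
    (st : PySem.Dict String (List Bool) × PySem.Dict String (List (Option Int)))
    (hINV : pvINV gs E st) (c : List Int) (hc : c ∈ gs)
    (hall : ∀ w ∈ c, pvCov E w = true) (hm : pvMatched c E) :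
    pvKey c ∈ pvSuccess st.1 ∧ st.2.getD (pvKey c) [] = c.map (pvFIdx E) := by
  obtain ⟨hnd1, hnd2, hcont, hspec⟩ := hINV
  have h1 := (hspec c hc).1
  have h2 := (hspec c hc).2
  unfold pvE1 at h1
  unfold pvE2 at h2
  rw [if_pos hm] at h1 h2
  constructor
  · rw [pvSuccessMem]
    refine ⟨c.map (pvCov E), (PySem.Dict.get?_eq_some_iff_mem_items _ _ _ hnd1).mp h1, ?_⟩
    rw [pvBoolsumIff]
    intro b hb
    obtain ⟨w, hw, rfl⟩ := List.mem_map.mp hb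
    exact hall w hw
  · rw [PySem.Dict.getD_eq_get?_getD, h2]; rfl

-- removal-set membership in terms of the events
theorem pvRemoveChar (al : List (String × Int)) (tags : List String)
    (groups : List (List Int)) (j : Int) :
    j ∈ pvRemoveB (pvFirstB al tags) groups ↔
      ∃ g ∈ groups, (∀ w ∈ g, pvCov (pvEvs al tags) w = true) ∧
        ∃ w ∈ g, pvFIdx (pvEvs al tags) w = some j := by
  unfold pvRemoveB
  rw [pvRemoveMem]
  have hnotin : ¬ j ∈ (PySem.Set.ofList ([] : List Int)) := by simp [PySem.Set.ofList]
  have hcov : ∀ w : Int, (pvFirstB al tags).contains w = pvCov (pvEvs al tags) w := by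
    intro w
    rw [PySem.Dict.contains_eq_isSome_get?, pvFirstBEq, pvCovIsSome]
  constructor
  · rintro (hs | ⟨g, hg, h1, w, hw, h2⟩)
    · exact absurd hs hnotin
    · refine ⟨g, hg, ?_, w, hw, ?_⟩
      · intro w' hw'; rw [← hcov w']; exact h1 w' hw'
      · rw [← pvFirstBEq]; exact h2
  · rintro ⟨g, hg, h1, w, hw, h2⟩
    refine Or.inr ⟨g, hg, ?_, w, hw, ?_⟩
    · intro w' hw'; rw [hcov w']; exact h1 w' hw'
    · rw [pvFirstBEq]; exact h2

-- ---- rebuilding the filtered word list as B builds it ----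

theorem pvFilterEq (rem : List Int) : ∀ (b fin : List String) (s : Int),
    fin.length = b.length →
    (∀ j : Nat, j < b.length →
      fin[j]? = if (s + (j : Int)) ∈ rem then some "[TO BE REMOVED]" else b[j]?) →
    (∀ w ∈ b, w ≠ "[TO BE REMOVED]") →
    fin.filter (fun w => w ≠ "[TO BE REMOVED]") =
      ((PySem.List.enumerate b s).filter (fun q => ¬ q.1 ∈ rem)).map (fun q => q.2) := by
  intro b
  induction b with
  | nil =>
    intro fin s hlen _ _
    rw [List.eq_nil_of_length_eq_zero hlen]
    simp [PySem.List.enumerate_nil]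
  | cons x b ih =>
    intro fin s hlen hj hsent
    cases fin with
    | nil => exact absurd hlen (by simp)
    | cons f0 fin' =>
      have hf0 : some f0 = if s ∈ rem then some "[TO BE REMOVED]" else some x := by
        have := hj 0 (by simp)
        simpa using this
      have hj' : ∀ j : Nat, j < b.length →
          fin'[j]? = if ((s + 1) + (j : Int)) ∈ rem then some "[TO BE REMOVED]" else b[j]? := by
        intro j hjb
        have := hj (j + 1) (by simpa using Nat.succ_lt_succ hjb)
        rw [List.getElem?_cons_succ, List.getElem?_cons_succ] at this
        rw [show s + ((j + 1 : Nat) : Int) = (s + 1) + (j : Int) by push_cast; ring] at this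
        exact this
      have htail := ih fin' (s + 1) (by simpa using hlen)
        hj' (fun w hw => hsent w (List.mem_cons_of_mem _ hw))
      rw [PySem.List.enumerate_cons]
      by_cases hs : s ∈ rem
      · rw [if_pos hs] at hf0
        have : f0 = "[TO BE REMOVED]" := Option.some_inj.mp hf0.symm |>.symm
        subst this
        rw [List.filter_cons, List.filter_cons]
        rw [if_neg (by simp), if_neg (by simp [hs])]
        exact htail
      · rw [if_neg hs] at hf0
        have hfx : f0 = x := (Option.some_inj.mp hf0)
        subst hfx
        rw [List.filter_cons, List.filter_cons]
        rw [if_pos (by simpa using hsent _ List.mem_cons_self), if_pos (by simp [hs])]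
        rw [List.map_cons]
        rw [htail]

-- ---- the main branches agree ----

theorem pvMainEq (p : String) (al : List (String × Int)) (wrets prets : List (List Int)) :
    pvMainA p al wrets prets = pvMainB p al wrets prets := by
  unfold pvMainA pvMainB
  dsimp only
  rw [pvLoopAEq]
  dsimp only
  apply congrArg (PySem.Str.join " ")
  set tags := (PySem.List.slice? (PySem.Str.split₀ p) (some 1) none 2).getD [] with htags
  set pwords := (PySem.List.slice? (PySem.Str.split₀ p) none none 2).getD [] with hpwords
  set E := pvEvs al tags with hE
  set stW := E.foldl (fun st e => wrets.foldl (pvGroupStep e.1 e.2) st)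
    (PySem.Dict.empty, PySem.Dict.empty) with hstW
  set stP := E.foldl (fun st e => prets.foldl (pvGroupStep e.1 e.2) st)
    (PySem.Dict.empty, PySem.Dict.empty) with hstP
  have hINVW : pvINV wrets E stW := pvRunINV wrets E
  have hINVP : pvINV prets E stP := pvRunINV prets E
  have hnnW : ∀ k ∈ pvSuccess stW.1, ∀ i : Int, some i ∈ stW.2.getD k [] → 0 ≤ i := by
    intro k hk i hi
    obtain ⟨c, hc, rfl, hgetd, hall⟩ := pvSuccElim E wrets stW hINVW k hk
    rw [hgetd] at hi
    obtain ⟨w, hw, hfw⟩ := List.mem_map.mp hi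
    exact pvFIdxNonneg al tags w i hfw
  have hnnP : ∀ k ∈ pvSuccess stP.1, ∀ i : Int, some i ∈ stP.2.getD k [] → 0 ≤ i := by
    intro k hk i hi
    obtain ⟨c, hc, rfl, hgetd, hall⟩ := pvSuccElim E prets stP hINVP k hk
    rw [hgetd] at hi
    obtain ⟨w, hw, hfw⟩ := List.mem_map.mp hi
    exact pvFIdxNonneg al tags w i hfw
  apply pvFilterEq (pvRemoveB (pvFirstB al tags) (wrets ++ prets))
  · rw [pvMarkLen, pvMarkLen]
  · intro j hjlen
    rw [pvMarkGet stP.2 (pvSuccess stP.1) _ j hnnP, pvMarkLen,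
      pvMarkGet stW.2 (pvSuccess stW.1) _ j hnnW]
    have hremiff : ((0 + (j : Int)) ∈ pvRemoveB (pvFirstB al tags) (wrets ++ prets)) ↔
        ((∃ k ∈ pvSuccess stW.1, some (j : Int) ∈ stW.2.getD k []) ∨
         (∃ k ∈ pvSuccess stP.1, some (j : Int) ∈ stP.2.getD k [])) := by
      rw [zero_add, pvRemoveChar]
      constructor
      · rintro ⟨g, hg, hall, w, hw, hfw⟩
        have hm : pvMatched g E := by
          apply pvCovMatched g E w hw
          rw [pvCovIsSome, hfw]; rfl
        rcases List.mem_append.mp hg with hg | hg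
        · obtain ⟨hsucc, hgetd⟩ := pvSuccIntro E wrets stW hINVW g hg hall hm
          exact Or.inl ⟨pvKey g, hsucc, hgetd ▸ List.mem_map.mpr ⟨w, hw, hfw⟩⟩
        · obtain ⟨hsucc, hgetd⟩ := pvSuccIntro E prets stP hINVP g hg hall hm
          exact Or.inr ⟨pvKey g, hsucc, hgetd ▸ List.mem_map.mpr ⟨w, hw, hfw⟩⟩
      · rintro (⟨k, hk, hik⟩ | ⟨k, hk, hik⟩)
        · obtain ⟨c, hc, rfl, hgetd, hall⟩ := pvSuccElim E wrets stW hINVW k hk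
          rw [hgetd] at hik
          obtain ⟨w, hw, hfw⟩ := List.mem_map.mp hik
          exact ⟨c, List.mem_append.mpr (Or.inl hc), hall, w, hw, hfw⟩
        · obtain ⟨c, hc, rfl, hgetd, hall⟩ := pvSuccElim E prets stP hINVP k hk
          rw [hgetd] at hik
          obtain ⟨w, hw, hfw⟩ := List.mem_map.mp hik
          exact ⟨c, List.mem_append.mpr (Or.inr hc), hall, w, hw, hfw⟩
    by_cases hW : ∃ k ∈ pvSuccess stW.1, some (j : Int) ∈ stW.2.getD k []
    · rw [if_pos (show (∃ k ∈ pvSuccess stW.1, some (j : Int) ∈ stW.2.getD k []) ∧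
          j < pwords.length from ⟨hW, hjlen⟩)]
      by_cases hP : ∃ k ∈ pvSuccess stP.1, some (j : Int) ∈ stP.2.getD k []
      · rw [if_pos (show (∃ k ∈ pvSuccess stP.1, some (j : Int) ∈ stP.2.getD k []) ∧
            j < pwords.length from ⟨hP, hjlen⟩)]
        rw [if_pos (hremiff.mpr (Or.inl hW))]
      · rw [if_neg (show ¬((∃ k ∈ pvSuccess stP.1, some (j : Int) ∈ stP.2.getD k []) ∧
            j < pwords.length) from fun hh => hP hh.1)]
        rw [if_pos (hremiff.mpr (Or.inl hW))]
    · rw [if_neg (show ¬((∃ k ∈ pvSuccess stW.1, some (j : Int) ∈ stW.2.getD k []) ∧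
          j < pwords.length) from fun hh => hW hh.1)]
      by_cases hP : ∃ k ∈ pvSuccess stP.1, some (j : Int) ∈ stP.2.getD k []
      · rw [if_pos (show (∃ k ∈ pvSuccess stP.1, some (j : Int) ∈ stP.2.getD k []) ∧
            j < pwords.length from ⟨hP, hjlen⟩)]
        rw [if_pos (hremiff.mpr (Or.inr hP))]
      · rw [if_neg (show ¬((∃ k ∈ pvSuccess stP.1, some (j : Int) ∈ stP.2.getD k []) ∧
            j < pwords.length) from fun hh => hP hh.1)]
        rw [if_neg (fun hh => by rcases hremiff.mp hh with h | h; exacts [hW h, hP h])]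
  · exact pvNoSent p

-- ===== VERDICT (by name: the statement is the Claim_ definition above) =====
theorem remove_retracing_spec : Claim_equal_remove_retracing := by
  unfold Claim_equal_remove_retracing
  intro pred al ae _
  unfold Spec_remove_retracing
  cases ae with
  | none => cases pred <;> rfl
  | some ae =>
    cases pred with
    | none => rfl
    | some p =>
      simp only [remove_retracing, remove_retracing_alt]
      by_cases hp : p = ""
      · rw [if_pos hp, if_pos hp]
      · rw [if_neg hp, if_neg hp, pvMainEq]
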